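-- pv_equiv track=rewrite | github.com/Unperceivable/advent-of-code | 2023/12/hot_springs.py | generate_arrangements
-- ===== SOURCE A (Python) =====
-- def generate_arrangements(line):
--     arrangements = [line]
--     while "?" in arrangements[0]:
--         new_arrangements = []
--         for line in arrangements:
--             new_arrangements.append(line.replace("?", "#", 1))
--             new_arrangements.append(line.replace("?", ".", 1))
--         arrangements = new_arrangements
--
--     arrangements = [arrangement.split(".") for arrangement in arrangements]
--     arrangement_lens = []
--     for arrangement in arrangements:
--         arrangement_lens.append([len(str) for str in arrangement if str])
--     return arrangement_lens
-- ===== SOURCE B (Python) =====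
-- def generate_arrangements(line):
--     # One pass over the characters with a running group length `cur` and the
--     # groups closed so far `done`; recursion only branches at a '?' ('#' branch
--     # first, so the order equals A's first-?-as-MSB expansion order). The filled
--     # strings are never materialised.
--     def go(i, cur):
--         done = []
--         while i < len(line):
--             c = line[i]
--             if c == '?':
--                 a = go(i + 1, cur + 1)
--                 pref = [cur] if cur else []
--                 b = [pref + g for g in go(i + 1, 0)]
--                 return [done + g for g in a + b]
--             if c == '.':
--                 if cur:
--                     done.append(cur)
--                 cur = 0
--             else:
--                 cur += 1
--             i += 1
--         return [done + ([cur] if cur else [])]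
--
--     return go(0, 0)
-- ===== Notes on version B (the rewrite author's own statement) =====
-- stated objective: alternative
-- what changed: A repeatedly rewrites whole strings (one replace-pass per '?' over a doubling list, then split('.') on every arrangement); B makes a single two-way recursion over the characters with a running group length, emitting each arrangement's group lengths directly without ever materialising the filled strings.
import Mathlib
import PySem

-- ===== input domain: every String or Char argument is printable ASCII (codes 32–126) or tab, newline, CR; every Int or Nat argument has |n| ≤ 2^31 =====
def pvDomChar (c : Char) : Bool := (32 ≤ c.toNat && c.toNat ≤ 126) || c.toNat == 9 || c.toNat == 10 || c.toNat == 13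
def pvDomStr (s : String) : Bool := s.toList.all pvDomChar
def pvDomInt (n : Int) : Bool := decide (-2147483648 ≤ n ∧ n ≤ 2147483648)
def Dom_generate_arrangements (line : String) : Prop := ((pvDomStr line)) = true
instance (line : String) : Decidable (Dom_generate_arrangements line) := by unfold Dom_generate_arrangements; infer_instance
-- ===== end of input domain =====

-- B replaces A's breadth-first string rewriting (repeated replace/split passes) by one
-- recursive pass over the characters that emits the group lengths directly (objective:
-- alternative algorithm, never materialises the filled strings).

-- ===== PORT A =====
-- line.replace("?", c, 1) : replace the first '?' only (by hand, exact: PySem.Chars.replace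
-- has no count parameter)
def pvReplFirstQ (c : Char) : List Char → List Char
  | [] => []
  | x :: xs => if x = '?' then c :: xs else x :: pvReplFirstQ c xs

-- the body of the while loop: for line in arrangements: append replace-with-'#', replace-with-'.'
def pvStepA (arr : List (List Char)) : List (List Char) :=
  arr.foldl (fun acc l => acc ++ [pvReplFirstQ '#' l, pvReplFirstQ '.' l]) []

-- the while loop; fuel = number of '?' in the initial line (the loop removes exactly one
-- '?' per element per pass, so this fuel merely makes the same computation total)
def pvLoopA : Nat → List (List Char) → List (List Char)
  | 0, arr => arr
  | n + 1, arr => if '?' ∈ arr.headD [] then pvLoopA n (pvStepA arr) else arr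

-- arrangement.split(".")  then  [len(str) for str in arrangement if str]
def pvLensA (l : List Char) : List Int :=
  ((PySem.Chars.splitOn l ['.']).filter (fun s => s ≠ [])).map (fun s => (s.length : Int))

def generate_arrangements (line : String) : List (List Int) :=
  (pvLoopA (line.toList.count '?') [line.toList]).map pvLensA

-- ===== PORT B =====
-- go(i, cur) of Source B: the while loop over plain characters becomes the structural
-- recursion on the remaining characters carrying (cur, done); recursion branches only
-- at a '?', with the '#' branch (a) before the '.' branch (b), as in Source B
def pvGoB : List Char → Nat → List Int → List (List Int)
  | [], cur, done => [done ++ (if cur = 0 then [] else [(cur : Int)])]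
  | c :: rest, cur, done =>
    if c = '?' then
      let a := pvGoB rest (cur + 1) []
      let pref := if cur = 0 then [] else [(cur : Int)]
      let b := (pvGoB rest 0 []).map (fun g => pref ++ g)
      (a ++ b).map (fun g => done ++ g)
    else if c = '.' then
      pvGoB rest 0 (done ++ (if cur = 0 then [] else [(cur : Int)]))
    else
      pvGoB rest (cur + 1) done

def generate_arrangements_alt (line : String) : List (List Int) :=
  pvGoB line.toList 0 []

-- ===== PRECONDITION & SPEC =====
def Spec_generate_arrangements (line : String) (out : List (List Int)) : Prop := out = generate_arrangements_alt line
instance (line : String) (out : List (List Int)) : Decidable (Spec_generate_arrangements line out) := by unfold Spec_generate_arrangements; infer_instance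

-- ===== CLAIM (what is proved, stated in full; the proofs are below) =====
def Claim_equal_generate_arrangements : Prop := ∀ (line : String), Dom_generate_arrangements line → Spec_generate_arrangements line (generate_arrangements line)

-- ===== LEMMAS AND PROOFS =====

-- the list of all fillings of l, first '?' most significant, '#' before '.'
def pvExpand : List Char → List (List Char)
  | [] => [[]]
  | c :: rest =>
    if c = '?' then
      (pvExpand rest).map ('#' :: ·) ++ (pvExpand rest).map ('.' :: ·)
    else
      (pvExpand rest).map (c :: ·)

-- split on '.' as a plain structural recursion
def pvSplit1 : List Char → List (List Char)
  | [] => [[]]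
  | c :: rest =>
    if c = '.' then [] :: pvSplit1 rest
    else match pvSplit1 rest with
      | [] => [[c]]
      | p :: ps => (c :: p) :: ps

-- group lengths of the tail pieces / of all pieces with a pending open group of size cur
def pvF0 : List (List Char) → List Int
  | [] => []
  | p :: ps => (if p = [] then [] else [(p.length : Int)]) ++ pvF0 ps

def pvF (cur : Nat) : List (List Char) → List Int
  | [] => []
  | p :: ps => (if cur + p.length = 0 then [] else [(cur : Int) + (p.length : Int)]) ++ pvF0 ps

theorem pvSplit1_ne_nil (l : List Char) : pvSplit1 l ≠ [] := by
  cases l with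
  | nil => simp [pvSplit1]
  | cons c rest =>
    simp only [pvSplit1]
    split
    · simp
    · split <;> simp

theorem pvSplitOn_go_eq (fuel : Nat) :
    ∀ (l cur : List Char) (acc : List (List Char)), l.length < fuel →
      PySem.Chars.splitOn.go ['.'] fuel l cur acc =
        acc.reverse ++ (match pvSplit1 l with
          | [] => []
          | p :: ps => (cur.reverse ++ p) :: ps) := by
  induction fuel with
  | zero => intro l cur acc h; omega
  | succ n ih =>
    intro l cur acc h
    cases l with
    | nil =>
      rw [PySem.Chars.splitOn.go.eq_def]
      simp [pvSplit1]
    | cons c rest =>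
      rw [PySem.Chars.splitOn.go.eq_def]
      show (if ['.'].isPrefixOf (c :: rest) = true then
            PySem.Chars.splitOn.go ['.'] n (List.drop ['.'].length (c :: rest)) [] (cur.reverse :: acc)
          else PySem.Chars.splitOn.go ['.'] n rest (c :: cur) acc) = _
      simp only [List.length_cons] at h
      by_cases hc : c = '.'
      · subst hc
        rw [if_pos (by simp)]
        simp only [List.length_singleton, List.drop_succ_cons, List.drop_zero]
        rw [ih rest [] (cur.reverse :: acc) (by omega)]
        simp only [pvSplit1]
        cases hs : pvSplit1 rest with
        | nil => exact absurd hs (pvSplit1_ne_nil rest)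
        | cons p ps => simp
      · rw [if_neg (by
          simp only [List.isPrefixOf_iff_prefix, List.cons_prefix_cons, List.nil_prefix,
            and_true]
          exact fun h' => hc h'.symm)]
        rw [ih rest (c :: cur) acc (by omega)]
        simp only [pvSplit1, if_neg hc]
        cases hs : pvSplit1 rest with
        | nil => exact absurd hs (pvSplit1_ne_nil rest)
        | cons p ps => simp

theorem pvSplitOn_eq (l : List Char) : PySem.Chars.splitOn l ['.'] = pvSplit1 l := by
  show PySem.Chars.splitOn.go ['.'] (l.length + 1) l [] [] = pvSplit1 l
  rw [pvSplitOn_go_eq (l.length + 1) l [] [] (by omega)]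
  cases hs : pvSplit1 l with
  | nil => exact absurd hs (pvSplit1_ne_nil l)
  | cons p ps => simp

theorem pvF0_eq_filter_map (ps : List (List Char)) :
    pvF0 ps = (ps.filter (fun s => s ≠ [])).map (fun s => (s.length : Int)) := by
  induction ps with
  | nil => simp [pvF0]
  | cons p ps ih =>
    by_cases hp : p = [] <;> simp [pvF0, hp, ih]

theorem pvLensA_eq_F0 (l : List Char) : pvLensA l = pvF0 (pvSplit1 l) := by
  rw [pvLensA, pvSplitOn_eq, pvF0_eq_filter_map]

theorem pvF_zero (p : List Char) (ps : List (List Char)) :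
    pvF 0 (p :: ps) = pvF0 (p :: ps) := by
  simp only [pvF, pvF0]
  by_cases hp : p = []
  · simp [hp]
  · have : p.length ≠ 0 := by simpa using hp
    simp [hp, this]

-- the single-string (no '?') value of pvGoB corresponds to pvF over pvSplit1
def pvGl : List Char → Nat → List Int
  | [], cur => if cur = 0 then [] else [(cur : Int)]
  | c :: rest, cur =>
    if c = '.' then (if cur = 0 then [] else [(cur : Int)]) ++ pvGl rest 0
    else pvGl rest (cur + 1)

theorem pvGl_F (l : List Char) : ∀ cur : Nat, pvGl l cur = pvF cur (pvSplit1 l) := by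
  induction l with
  | nil =>
    intro cur
    by_cases hc : cur = 0 <;> simp [pvGl, pvSplit1, pvF, pvF0, hc]
  | cons c rest ih =>
    intro cur
    by_cases hc : c = '.'
    · subst hc
      simp only [pvGl, pvSplit1, ih]
      cases hs : pvSplit1 rest with
      | nil => exact absurd hs (pvSplit1_ne_nil rest)
      | cons p ps =>
        rw [pvF_zero p ps]
        by_cases h0 : cur = 0 <;> simp [pvF, h0]
    · simp only [pvGl, if_neg hc, pvSplit1, ih]
      cases hs : pvSplit1 rest with
      | nil => exact absurd hs (pvSplit1_ne_nil rest)
      | cons p ps =>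
        simp only [pvF]
        have h1 : ¬ (cur + 1 + p.length = 0) := by omega
        have h2 : ¬ (cur + (c :: p).length = 0) := by simp only [List.length_cons]; omega
        rw [if_neg h1, if_neg h2]
        simp only [List.length_cons]
        have harith : ((cur : Int) + 1) + (p.length : Int) = (cur : Int) + ((p.length : Int) + 1) := by
          ring
        push_cast
        rw [harith]

theorem pvGl_eq_lensA (l : List Char) : pvGl l 0 = pvLensA l := by
  rw [pvLensA_eq_F0, pvGl_F]
  cases hs : pvSplit1 l with
  | nil => exact absurd hs (pvSplit1_ne_nil l)
  | cons p ps => exact pvF_zero p ps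

-- unfolding equations for pvGl on a cons
theorem pvGl_cons_dot (s : List Char) (cur : Nat) :
    pvGl ('.' :: s) cur = (if cur = 0 then [] else [(cur : Int)]) ++ pvGl s 0 := by
  simp [pvGl]

theorem pvGl_cons_ne (c : Char) (hc : c ≠ '.') (s : List Char) (cur : Nat) :
    pvGl (c :: s) cur = pvGl s (cur + 1) := by
  simp [pvGl, hc]

-- B computes, for each filling in expansion order, the closed groups then the group lengths
theorem pvGoB_expand (l : List Char) : ∀ (cur : Nat) (done : List Int),
    pvGoB l cur done = (pvExpand l).map (fun s => done ++ pvGl s cur) := by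
  induction l with
  | nil => intro cur done; simp [pvGoB, pvExpand, pvGl]
  | cons c rest ih =>
    intro cur done
    by_cases hq : c = '?'
    · subst hq
      have e1 : pvGoB ('?' :: rest) cur done =
          (pvGoB rest (cur + 1) [] ++
            (pvGoB rest 0 []).map (fun g => (if cur = 0 then [] else [(cur : Int)]) ++ g)).map
            (fun g => done ++ g) := by
        simp [pvGoB]
      have e2 : pvExpand ('?' :: rest) =
          (pvExpand rest).map ('#' :: ·) ++ (pvExpand rest).map ('.' :: ·) := by
        simp [pvExpand]
      rw [e1, e2, ih, ih]
      simp only [List.map_append, List.map_map, List.nil_append]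
      congr 1
    · by_cases hd : c = '.'
      · subst hd
        have e1 : pvGoB ('.' :: rest) cur done =
            pvGoB rest 0 (done ++ (if cur = 0 then [] else [(cur : Int)])) := by
          simp [pvGoB]
        have e2 : pvExpand ('.' :: rest) = (pvExpand rest).map ('.' :: ·) := by
          simp [pvExpand]
        rw [e1, e2, ih, List.map_map]
        apply List.map_congr_left
        intro s _
        simp [Function.comp, pvGl_cons_dot]
      · have e1 : pvGoB (c :: rest) cur done = pvGoB rest (cur + 1) done := by
          simp [pvGoB, hq, hd]
        have e2 : pvExpand (c :: rest) = (pvExpand rest).map (c :: ·) := by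
          simp [pvExpand, hq]
        rw [e1, e2, ih, List.map_map]
        apply List.map_congr_left
        intro s _
        simp [Function.comp, pvGl_cons_ne c hd]

theorem pvExpand_no_q (l : List Char) (h : '?' ∉ l) : pvExpand l = [l] := by
  induction l with
  | nil => simp [pvExpand]
  | cons c rest ih =>
    simp only [List.mem_cons, not_or] at h
    have hc : ¬ c = '?' := fun h' => h.1 h'.symm
    simp [pvExpand, hc, ih h.2]

theorem pvExpand_repl (l : List Char) (h : '?' ∈ l) :
    pvExpand (pvReplFirstQ '#' l) ++ pvExpand (pvReplFirstQ '.' l) = pvExpand l := by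
  induction l with
  | nil => simp at h
  | cons c rest ih =>
    by_cases hq : c = '?'
    · subst hq
      simp [pvReplFirstQ, pvExpand, (by decide : ('#' : Char) ≠ '?'),
        (by decide : ('.' : Char) ≠ '?')]
    · have hrest : '?' ∈ rest := by
        rcases List.mem_cons.mp h with h1 | h1
        · exact absurd h1.symm hq
        · exact h1
      simp only [pvReplFirstQ, pvExpand, if_neg hq]
      rw [← List.map_append, ih hrest]

theorem pvCount_repl (c : Char) (hc : c ≠ '?') (l : List Char) (h : '?' ∈ l) :
    (pvReplFirstQ c l).count '?' = l.count '?' - 1 := by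
  induction l with
  | nil => simp at h
  | cons x rest ih =>
    by_cases hx : x = '?'
    · subst hx
      simp [pvReplFirstQ, hc]
    · have hrest : '?' ∈ rest := by
        rcases List.mem_cons.mp h with h1 | h1
        · exact absurd h1.symm hx
        · exact h1
      have hpos : 0 < rest.count '?' := List.count_pos_iff.mpr hrest
      simp only [pvReplFirstQ, if_neg hx, List.count_cons, ih hrest]
      have : (x == '?') = false := by simpa using hx
      simp [this]

theorem pvStepA_eq (arr : List (List Char)) :
    pvStepA arr = arr.flatMap (fun l => [pvReplFirstQ '#' l, pvReplFirstQ '.' l]) := by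
  unfold pvStepA
  rw [PySem.List.foldl_append_eq_flatMap]
  simp

theorem pvLoopA_expand : ∀ (k : Nat) (arr : List (List Char)),
    arr ≠ [] → (∀ l ∈ arr, l.count '?' = k) →
    pvLoopA k arr = arr.flatMap pvExpand := by
  intro k
  induction k with
  | zero =>
    intro arr _ hcount
    simp only [pvLoopA]
    have : ∀ l ∈ arr, pvExpand l = [l] := by
      intro l hl
      exact pvExpand_no_q l (by
        intro hmem
        have := List.count_pos_iff.mpr hmem
        rw [hcount l hl] at this
        omega)
    rw [List.flatMap_congr this]
    simp
  | succ n ih =>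
    intro arr hne hcount
    have hhead : '?' ∈ arr.headD [] := by
      cases arr with
      | nil => exact absurd rfl hne
      | cons a rest =>
        have ha := hcount a (List.mem_cons_self)
        show '?' ∈ a
        exact List.count_pos_iff.mp (by rw [ha]; omega)
    simp only [pvLoopA, if_pos hhead]
    have hmem : ∀ l ∈ arr, '?' ∈ l := by
      intro l hl
      exact List.count_pos_iff.mp (by rw [hcount l hl]; omega)
    rw [pvStepA_eq, ih]
    · rw [List.flatMap_assoc]
      apply List.flatMap_congr
      intro l hl
      simp only [List.flatMap_cons, List.flatMap_nil, List.append_nil]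
      exact pvExpand_repl l (hmem l hl)
    · cases arr with
      | nil => exact absurd rfl hne
      | cons a rest => simp
    · intro l hl
      simp only [List.mem_flatMap] at hl
      obtain ⟨m, hm, hlm⟩ := hl
      have hq := hmem m hm
      have := hcount m hm
      simp only [List.mem_cons, List.not_mem_nil, or_false] at hlm
      rcases hlm with h1 | h1
      · rw [h1, pvCount_repl '#' (by decide) m hq, this]; omega
      · rw [h1, pvCount_repl '.' (by decide) m hq, this]; omega

-- ===== VERDICT (by name: the statement is the Claim_ definition above) =====
theorem generate_arrangements_spec : Claim_equal_generate_arrangements := by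
  intro line _
  unfold Spec_generate_arrangements generate_arrangements generate_arrangements_alt
  rw [pvLoopA_expand (line.toList.count '?') [line.toList] (by simp)
    (by intro l hl; simp at hl; rw [hl])]
  rw [pvGoB_expand]
  simp only [List.flatMap_cons, List.flatMap_nil, List.append_nil, List.nil_append]
  apply List.map_congr_left
  intro s _
  exact (pvGl_eq_lensA s).symm
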